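-- pv_equiv track=rewrite | github.com/VihariKanukollu/manas | dataset/build_dsl_dataset.py | locate_eq_solution_span
-- ===== SOURCE A (Python) =====
-- from typing import List, Dict, Any, Tuple
--
-- def locate_eq_solution_span(token_names: List[str]) -> Tuple[int, int]:
--     """
--     Locate the answer span for EQ/IS_SOLUTION style modules.
--
--     Expected tail structure (see `build_equation_solution_tokens` and
--     `build_system_solution_tokens` in `dev/gen_full_math.py`):
--
--         ... EQ REAL_VAR_k <answer_tokens...> IS_SOLUTION EOS
--
--     We return (start, end) indices for `<answer_tokens...>`.
--     """
--     try:
--         is_idx = token_names.index("IS_SOLUTION")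
--     except ValueError:
--         return 0, 0
--
--     # Find the EQ that immediately precedes this IS_SOLUTION.
--     eq_idx = -1
--     for i in range(is_idx - 1, -1, -1):
--         if token_names[i] == "EQ":
--             eq_idx = i
--             break
--
--     if eq_idx < 0:
--         return 0, 0
--
--     # Sanity check: token right after EQ should be REAL_VAR_*
--     if eq_idx + 1 >= len(token_names):
--         return 0, 0
--     if not token_names[eq_idx + 1].startswith("REAL_VAR_"):
--         return 0, 0
--
--     answer_start = eq_idx + 2
--     answer_end = is_idx
--     if answer_start >= answer_end:
--         return 0, 0
--     return answer_start, answer_end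
-- ===== SOURCE B (Python) =====
-- from typing import List, Tuple
--
-- def locate_eq_solution_span(token_names: List[str]) -> Tuple[int, int]:
--     """Single forward pass: track the last EQ index, stop at the first IS_SOLUTION."""
--     last_eq = -1
--     is_idx = None
--     for i, name in enumerate(token_names):
--         if name == "IS_SOLUTION":
--             is_idx = i
--             break
--         if name == "EQ":
--             last_eq = i
--     if is_idx is None or last_eq < 0:
--         return 0, 0
--     start, end = last_eq + 2, is_idx
--     if start < end and start - 1 < len(token_names) and token_names[start - 1].startswith("REAL_VAR_"):
--         return start, end
--     return 0, 0
-- ===== Notes on version B (the rewrite author's own statement) =====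
-- stated objective: simpler
-- what changed: Replaced A's two directional passes (forward .index for IS_SOLUTION, then a backward loop from it for the nearest EQ) by one forward pass that tracks the last EQ index seen and stops at the first IS_SOLUTION, with the trailing guards collapsed into a single conjunction.
import Mathlib
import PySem

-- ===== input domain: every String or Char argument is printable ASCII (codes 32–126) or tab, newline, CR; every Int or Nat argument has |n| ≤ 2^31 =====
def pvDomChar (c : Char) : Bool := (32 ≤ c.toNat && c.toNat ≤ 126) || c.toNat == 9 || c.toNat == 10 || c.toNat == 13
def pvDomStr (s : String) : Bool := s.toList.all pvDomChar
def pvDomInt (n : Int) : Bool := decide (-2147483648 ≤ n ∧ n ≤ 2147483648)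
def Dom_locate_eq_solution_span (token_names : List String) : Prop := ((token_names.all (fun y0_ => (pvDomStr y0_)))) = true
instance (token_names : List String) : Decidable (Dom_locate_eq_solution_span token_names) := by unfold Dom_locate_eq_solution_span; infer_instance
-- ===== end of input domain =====

-- B replaces A's forward .index pass plus backward EQ search by ONE forward pass keeping the last EQ seen (objective: simpler; same O(n)).

-- ===== PORT A =====
-- A's backward loop 'for i in range(is_idx-1,-1,-1): if token_names[i]=="EQ": eq_idx=i; break'
def pvFindEqBack (ts : List String) : List Int → Int
  | [] => -1
  | i :: rest =>
    match PySem.List.pyGet? ts i with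
    | some t => if t = "EQ" then i else pvFindEqBack ts rest
    | none => pvFindEqBack ts rest      -- unreachable: the range indices are in bounds

def locate_eq_solution_span (token_names : List String) : Int × Int :=
  match PySem.List.index? token_names "IS_SOLUTION" with
  | none => (0, 0)
  | some isIdxN =>
    let is_idx : Int := isIdxN
    let eq_idx := pvFindEqBack token_names (PySem.List.pyRange (is_idx - 1) (-1) (-1))
    if eq_idx < 0 then (0, 0)
    else if eq_idx + 1 ≥ (token_names.length : Int) then (0, 0)
    else
      match PySem.List.pyGet? token_names (eq_idx + 1) with
      | none => (0, 0)      -- unreachable: index checked in bounds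
      | some t =>
        if ¬ (PySem.Str.startswith t "REAL_VAR_" = true) then (0, 0)
        else
          let answer_start := eq_idx + 2
          let answer_end := is_idx
          if answer_start ≥ answer_end then (0, 0) else (answer_start, answer_end)

-- ===== PORT B =====
-- B's single forward loop: returns some (last_eq, is_idx) when IS_SOLUTION is hit, none if the loop ends
def pvScanB : List String → Int → Int → Option (Int × Int)
  | [], _, _ => none
  | t :: rest, i, last_eq =>
    if t = "IS_SOLUTION" then some (last_eq, i)
    else pvScanB rest (i + 1) (if t = "EQ" then i else last_eq)

def locate_eq_solution_span_alt (token_names : List String) : Int × Int :=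
  match pvScanB token_names 0 (-1) with
  | none => (0, 0)
  | some (last_eq, is_idx) =>
    if last_eq < 0 then (0, 0)
    else
      let start := last_eq + 2
      if start < is_idx ∧ start - 1 < (token_names.length : Int) ∧
          PySem.Str.startswith ((PySem.List.pyGet? token_names (start - 1)).getD "") "REAL_VAR_" = true
      then (start, is_idx) else (0, 0)

-- ===== PRECONDITION & SPEC =====
def Spec_locate_eq_solution_span (token_names : List String) (out : Int × Int) : Prop := out = locate_eq_solution_span_alt token_names
instance (token_names : List String) (out : Int × Int) : Decidable (Spec_locate_eq_solution_span token_names out) := by unfold Spec_locate_eq_solution_span; infer_instance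

-- ===== CLAIM (what is proved, stated in full; the proofs are below) =====
def Claim_equal_locate_eq_solution_span : Prop := ∀ (token_names : List String), Dom_locate_eq_solution_span token_names → Spec_locate_eq_solution_span token_names (locate_eq_solution_span token_names)

-- ===== LEMMAS AND PROOFS =====

-- forward fold computing the index of the last "EQ" among ts, positions starting at k, default le
def pvLastEqFwd : List String → Nat → Int → Int
  | [], _, le => le
  | t :: r, k, le => pvLastEqFwd r (k + 1) (if t = "EQ" then (k : Int) else le)

theorem pvScanB_eq (ts : List String) : ∀ (k : Nat) (le : Int),
    pvScanB ts k le =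
      match ts.findIdx? (· == "IS_SOLUTION") with
      | none => none
      | some j => some (pvLastEqFwd (ts.take j) k le, (k : Int) + j) := by
  induction ts with
  | nil => intro k le; simp [pvScanB]
  | cons t r ih =>
    intro k le
    by_cases h : t = "IS_SOLUTION"
    · subst h; simp [pvScanB, List.findIdx?_cons, pvLastEqFwd]
    · simp only [pvScanB, if_neg h]
      have hk : ((k : Int) + 1) = ((k + 1 : Nat) : Int) := by push_cast; ring
      rw [hk, ih (k + 1)]
      simp only [List.findIdx?_cons, beq_iff_eq, if_neg h]
      cases hf : r.findIdx? (· == "IS_SOLUTION") with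
      | none => simp
      | some j =>
        simp only [Option.map_some, List.take_succ_cons, pvLastEqFwd]
        rw [show ((k + 1 : Nat) : Int) + (j : Int) = (k : Int) + ((j + 1 : Nat) : Int) by push_cast; ring]

theorem pvLastEqFwd_append (l : List String) (t : String) : ∀ (k : Nat) (le : Int),
    pvLastEqFwd (l ++ [t]) k le =
      if t = "EQ" then ((k + l.length : Nat) : Int) else pvLastEqFwd l k le := by
  induction l with
  | nil => intro k le; simp [pvLastEqFwd]
  | cons x r ih =>
    intro k le
    simp only [List.cons_append, pvLastEqFwd, ih, List.length_cons]
    by_cases ht : t = "EQ"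
    · simp only [ht, if_pos]; congr 1; omega
    · simp [ht]

-- A's backward scan over range(j-1, -1, -1) equals the forward last-EQ fold over the first j tokens
theorem pvFindEqBack_eq (ts : List String) (j : Nat) (hj : j ≤ ts.length) :
    pvFindEqBack ts (PySem.List.pyRange ((j : Int) - 1) (-1) (-1)) =
      pvLastEqFwd (ts.take j) 0 (-1) := by
  induction j with
  | zero => simp [PySem.List.pyRange_neg_one_eq_nil, pvFindEqBack, pvLastEqFwd]
  | succ n ih =>
    have hn : n < ts.length := by omega
    have h1 : ((n + 1 : Nat) : Int) - 1 = (n : Int) := by push_cast; ring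
    rw [h1, PySem.List.pyRange_neg_one_cons (by omega : (-1 : Int) < (n : Int))]
    simp only [pvFindEqBack, PySem.List.pyGet?_natCast, List.getElem?_eq_getElem hn]
    have htake : ts.take (n + 1) = ts.take n ++ [ts[n]] := by
      rw [List.take_add_one, List.getElem?_eq_getElem hn]; rfl
    rw [htake, pvLastEqFwd_append]
    have hlen : (ts.take n).length = n := by simp [List.length_take]; omega
    by_cases he : ts[n] = "EQ"
    · simp [he, hlen]
    · simp [he, ih (by omega)]

-- ===== VERDICT (by name: the statement is the Claim_ definition above) =====
theorem locate_eq_solution_span_spec : Claim_equal_locate_eq_solution_span := by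
  intro ts _
  unfold Spec_locate_eq_solution_span locate_eq_solution_span locate_eq_solution_span_alt
  have hscan := pvScanB_eq ts 0 (-1)
  norm_num at hscan
  rw [hscan]
  have hidx : PySem.List.index? ts "IS_SOLUTION" = ts.findIdx? (· == "IS_SOLUTION") := by
    rw [PySem.List.index?_eq_idxOf?]; rfl
  rw [hidx]
  cases hf : ts.findIdx? (· == "IS_SOLUTION") with
  | none => rfl
  | some j =>
    have hjlt : j < ts.length := by
      obtain ⟨hk, -, -⟩ := PySem.List.getElem_of_index?_eq_some (hidx.trans hf)
      exact hk
    simp only []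
    rw [pvFindEqBack_eq ts j (le_of_lt hjlt)]
    set E := pvLastEqFwd (ts.take j) 0 (-1) with hE
    by_cases hneg : E < 0
    · simp [hneg]
    · have hE0 : 0 ≤ E := le_of_not_gt hneg
      simp only [if_neg hneg]
      by_cases hlen : E + 1 ≥ (ts.length : Int)
      · have h2 : ¬ (E + 2 - 1 < (ts.length : Int)) := by omega
        rw [if_pos hlen, if_neg (fun hc => h2 hc.2.1)]
      · have hlt : E + 1 < (ts.length : Int) := lt_of_not_ge hlen
        simp only [if_neg hlen]
        have hget : PySem.List.pyGet? ts (E + 1) = some ts[(E + 1).toNat] :=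
          PySem.List.pyGet?_eq_some_getElem ts (by omega) hlt
        rw [show E + 2 - 1 = E + 1 by ring, hget]
        simp only [Option.getD_some]
        by_cases hsw : PySem.Str.startswith ts[(E + 1).toNat] "REAL_VAR_" = true
        · rw [if_neg (not_not_intro hsw)]
          by_cases hse : E + 2 ≥ (j : Int)
          · rw [if_pos hse, if_neg (fun hc => by omega)]
          · rw [if_neg hse, if_pos ⟨by omega, by omega, hsw⟩]
        · rw [if_pos hsw, if_neg (fun hc => hsw hc.2.2)]
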